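-- pv_equiv track=rewrite | github.com/murrodroid/ClassHistData | modules/tools.py | remove_text_after_comma
-- ===== SOURCE A (Python) =====
-- def remove_text_after_comma(s):
--     paren_level = 0
--     for i, c in enumerate(s):
--         if c == '(':
--             paren_level += 1
--         elif c == ')':
--             paren_level -= 1
--         elif c == ',' and paren_level == 0:
--             return s[:i]
--     return s
-- ===== SOURCE B (Python) =====
-- def remove_text_after_comma(s):
--     chunks = s.split(',')
--     bal = 0
--     acc = []
--     for i, ch in enumerate(chunks):
--         acc.append(ch)
--         bal += ch.count('(') - ch.count(')')
--         if bal == 0 and i != len(chunks) - 1: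
--             return ','.join(acc)
--     return s
-- ===== Notes on version B (the rewrite author's own statement) =====
-- stated objective: faster
-- what changed: Replaces the per-character depth scan with a split-first pass: the string is split on commas once, chunks are accumulated while a running parenthesis balance is updated from each chunk's open/close counts, and the accumulated chunks are rejoined at the first zero-balance boundary.
import Mathlib
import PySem

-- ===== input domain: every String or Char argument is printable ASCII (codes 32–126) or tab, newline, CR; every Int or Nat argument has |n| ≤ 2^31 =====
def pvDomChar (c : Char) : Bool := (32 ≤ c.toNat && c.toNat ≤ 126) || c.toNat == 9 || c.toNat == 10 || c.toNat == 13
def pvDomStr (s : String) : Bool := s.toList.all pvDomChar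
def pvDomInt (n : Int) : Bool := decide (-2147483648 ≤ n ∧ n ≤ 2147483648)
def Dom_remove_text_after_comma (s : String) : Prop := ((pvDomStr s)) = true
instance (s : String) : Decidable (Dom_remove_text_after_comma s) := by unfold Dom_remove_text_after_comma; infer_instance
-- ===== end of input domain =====

-- B replaces A's per-character parenthesis-depth scan by a split-first pass over whole
-- comma chunks (running balance from per-chunk open/close parenthesis counts); measured
-- faster in Python by a constant factor. Return values are proved equal on all inputs.

-- ===== PORT A =====
-- per-character loop: index i, paren_level; returns the index of the first top-level comma
def removeLoopA : List Char → Int → Nat → Option Nat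
  | [], _, _ => none
  | c :: rest, lvl, i =>
    if c = '(' then removeLoopA rest (lvl + 1) (i + 1)
    else if c = ')' then removeLoopA rest (lvl - 1) (i + 1)
    else if c = ',' ∧ lvl = 0 then some i
    else removeLoopA rest lvl (i + 1)

def remove_text_after_comma (s : String) : String :=
  match removeLoopA s.toList 0 0 with
  | some i => String.ofList (PySem.List.slice s.toList none (some (i : Int)))  -- s[:i]
  | none => s

-- ===== PORT B =====
def chunkBal (ch : List Char) : Int :=
  (PySem.Chars.count ch ['('] : Int) - (PySem.Chars.count ch [')'] : Int)

-- the for-loop over chunks: acc of chunks kept, running balance; 'i != len(chunks)-1' = rest ≠ []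
def loopB (s : String) : List (List Char) → Int → List (List Char) → String
  | [], _, _ => s
  | ch :: rest, bal, acc =>
    let acc' := acc ++ [ch]
    let bal' := bal + chunkBal ch
    if bal' = 0 ∧ rest ≠ [] then String.ofList (PySem.Chars.join [','] acc')
    else loopB s rest bal' acc'

def remove_text_after_comma_alt (s : String) : String :=
  loopB s (PySem.Chars.splitOn s.toList [',']) 0 []

-- ===== PRECONDITION & SPEC =====
def Spec_remove_text_after_comma (s : String) (out : String) : Prop := out = remove_text_after_comma_alt s
instance (s : String) (out : String) : Decidable (Spec_remove_text_after_comma s out) := by unfold Spec_remove_text_after_comma; infer_instance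

-- ===== CLAIM (what is proved, stated in full; the proofs are below) =====
def Claim_equal_remove_text_after_comma : Prop := ∀ (s : String), Dom_remove_text_after_comma s → Spec_remove_text_after_comma s (remove_text_after_comma s)

-- ===== LEMMAS AND PROOFS =====

def splitC : List Char → List (List Char)
  | [] => [[]]
  | c :: rest =>
    if c = ',' then [] :: splitC rest
    else
      match splitC rest with
      | [] => [[c]]
      | p :: ps => (c :: p) :: ps

def consH (x : List Char) : List (List Char) → List (List Char)
  | [] => [x]
  | p :: ps => (x ++ p) :: ps

lemma splitC_ne_nil (l : List Char) : splitC l ≠ [] := by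
  cases l with
  | nil => simp [splitC]
  | cons c rest =>
    simp only [splitC]
    split
    · simp
    · split <;> simp

lemma splitOn_go_eq (fuel : Nat) : ∀ (l cur : List Char) (acc : List (List Char)),
    l.length ≤ fuel →
    PySem.Chars.splitOn.go [','] fuel l cur acc = acc.reverse ++ consH cur.reverse (splitC l) := by
  induction fuel with
  | zero =>
    intro l cur acc h
    have : l = [] := List.eq_nil_of_length_eq_zero (Nat.le_zero.mp h)
    subst this
    simp [PySem.Chars.splitOn.go, splitC, consH]
  | succ fuel ih =>
    intro l cur acc h
    cases l with
    | nil => simp [PySem.Chars.splitOn.go, splitC, consH]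
    | cons c rest =>
      by_cases hc : c = ','
      · subst hc
        rw [PySem.Chars.splitOn.go]
        simp only [List.isPrefixOf, beq_self_eq_true, Bool.true_and, if_true, List.length_cons, List.length_nil, List.drop_succ_cons, List.drop_zero]
        rw [ih rest [] _ (by simpa using Nat.lt_succ_iff.mp (by simpa using h))]
        obtain ⟨p, ps, hps⟩ := List.exists_cons_of_ne_nil (splitC_ne_nil rest)
        simp [splitC, consH, hps]
      · rw [PySem.Chars.splitOn.go]
        have : ([','].isPrefixOf (c :: rest)) = false := by
          simp [List.isPrefixOf]; exact fun h' => absurd h'.symm hc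
        rw [this]
        simp only [Bool.false_eq_true, if_false]
        rw [ih rest (c :: cur) acc (by simpa using Nat.lt_succ_iff.mp (by simpa using h))]
        obtain ⟨p, ps, hps⟩ := List.exists_cons_of_ne_nil (splitC_ne_nil rest)
        simp [splitC, consH, hps, hc]

lemma splitOn_comma (l : List Char) : PySem.Chars.splitOn l [','] = splitC l := by
  rw [PySem.Chars.splitOn, splitOn_go_eq (l.length + 1) l [] [] (Nat.le_succ _)]
  obtain ⟨p, ps, hps⟩ := List.exists_cons_of_ne_nil (splitC_ne_nil l)
  simp [consH, hps]

lemma count_go_eq (ch : Char) (fuel : Nat) : ∀ (l : List Char) (acc : Nat),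
    l.length ≤ fuel →
    PySem.Chars.count.go [ch] fuel l acc = acc + l.count ch := by
  induction fuel with
  | zero =>
    intro l acc h
    have : l = [] := List.eq_nil_of_length_eq_zero (Nat.le_zero.mp h)
    subst this
    simp [PySem.Chars.count.go]
  | succ fuel ih =>
    intro l acc h
    cases l with
    | nil => simp [PySem.Chars.count.go]
    | cons c rest =>
      by_cases hc : c = ch
      · subst hc
        rw [PySem.Chars.count.go]
        simp only [List.isPrefixOf, beq_self_eq_true, Bool.true_and, if_true,
          List.length_cons, List.length_nil, List.drop_succ_cons, List.drop_zero]
        rw [ih rest (acc+1) (Nat.lt_succ_iff.mp (by simpa using h))]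
        simp
        omega
      · rw [PySem.Chars.count.go]
        have : ([ch].isPrefixOf (c :: rest)) = false := by
          simp [List.isPrefixOf]; exact fun h' => absurd h'.symm hc
        rw [this]
        simp only [Bool.false_eq_true, if_false]
        rw [ih rest acc (Nat.lt_succ_iff.mp (by simpa using h))]
        simp [hc]

lemma count_single (l : List Char) (ch : Char) : PySem.Chars.count l [ch] = l.count ch := by
  rw [PySem.Chars.count]
  simp only [List.isEmpty_cons, Bool.false_eq_true, if_false]
  simpa using count_go_eq ch l.length l 0 le_rfl

def balL (l : List Char) : Int := (l.count '(' : Int) - (l.count ')' : Int)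

lemma chunkBal_eq (ch : List Char) : chunkBal ch = balL ch := by
  simp [chunkBal, balL, count_single]

def scanC : List (List Char) → Int → Option (List (List Char))
  | [], _ => none
  | ch :: rest, lvl =>
    if rest = [] then none
    else if lvl + balL ch = 0 then some [ch]
    else (scanC rest (lvl + balL ch)).map (ch :: ·)

lemma scanC_ne_nil {chunks : List (List Char)} {lvl : Int} {t : List (List Char)}
    (h : scanC chunks lvl = some t) : t ≠ [] := by
  induction chunks generalizing lvl t with
  | nil => simp [scanC] at h
  | cons ch rest ih =>
    simp only [scanC] at h
    split at h
    · exact absurd h (by simp)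
    · split at h
      · simp [← Option.some_inj.mp h]
      · obtain ⟨t', ht', rfl⟩ := Option.map_eq_some_iff.mp h
        simp

def loopP : List Char → Int → Option (List Char)
  | [], _ => none
  | c :: rest, lvl =>
    if c = '(' then (loopP rest (lvl + 1)).map (c :: ·)
    else if c = ')' then (loopP rest (lvl - 1)).map (c :: ·)
    else if c = ',' ∧ lvl = 0 then some []
    else (loopP rest lvl).map (c :: ·)

lemma idx_bridge : ∀ (l : List Char) (lvl : Int) (i : Nat),
    removeLoopA l lvl i = (loopP l lvl).map (fun p => i + p.length) := by
  intro l
  induction l with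
  | nil => intro lvl i; simp [removeLoopA, loopP]
  | cons c rest ih =>
    intro lvl i
    simp only [removeLoopA, loopP]
    split_ifs with h1 h2 h3
    · rw [ih]; cases loopP rest (lvl + 1) <;> simp <;> omega
    · rw [ih]; cases loopP rest (lvl - 1) <;> simp <;> omega
    · simp
    · rw [ih]; cases loopP rest lvl <;> simp <;> omega

lemma loopP_prefix : ∀ (l : List Char) (lvl : Int) (p : List Char),
    loopP l lvl = some p → ∃ r, l = p ++ ',' :: r := by
  intro l
  induction l with
  | nil => intro lvl p h; simp [loopP] at h
  | cons c rest ih =>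
    intro lvl p h
    simp only [loopP] at h
    split_ifs at h with h1 h2 h3
    · obtain ⟨p', hp', rfl⟩ := Option.map_eq_some_iff.mp h
      obtain ⟨r, hr⟩ := ih _ _ hp'
      exact ⟨r, by simp [h1, hr]⟩
    · obtain ⟨p', hp', rfl⟩ := Option.map_eq_some_iff.mp h
      obtain ⟨r, hr⟩ := ih _ _ hp'
      exact ⟨r, by simp [h2, hr]⟩
    · obtain rfl : p = [] := by simpa using h.symm
      exact ⟨rest, by simp [h3.1]⟩
    · obtain ⟨p', hp', rfl⟩ := Option.map_eq_some_iff.mp h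
      obtain ⟨r, hr⟩ := ih _ _ hp'
      exact ⟨r, by simp [hr]⟩

lemma balL_cons (c : Char) (l : List Char) :
    balL (c :: l) = balL l + (if c = '(' then 1 else if c = ')' then -1 else 0) := by
  simp only [balL, List.count_cons, beq_iff_eq]
  have h1 : ('(' : Char) ≠ ')' := by decide
  by_cases hc : c = '('
  · subst hc; simp [h1.symm]; ring
  · by_cases hc2 : c = ')'
    · subst hc2; simp [h1]; ring
    · simp [hc, hc2]

lemma loopP_skip : ∀ (l : List Char), ',' ∉ l → ∀ (t : List Char) (lvl : Int),
    loopP (l ++ t) lvl = (loopP t (lvl + balL l)).map (l ++ ·) := by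
  intro l
  induction l with
  | nil =>
    intro _ t lvl
    simp [balL]
  | cons c rest ih =>
    intro hfree t lvl
    have hc : c ≠ ',' := fun h => hfree (h ▸ List.mem_cons_self)
    have hrest : ',' ∉ rest := fun h => hfree (List.mem_cons_of_mem _ h)
    simp only [List.cons_append, loopP]
    rw [balL_cons]
    split_ifs with h1 h2 h3
    · rw [ih hrest]
      simp [h1, Option.map_map, Function.comp_def]
      ring_nf
    · rw [ih hrest]
      simp [h1, h2, Option.map_map, Function.comp_def]
      ring_nf
    · exact absurd h3.1 hc
    · rw [ih hrest]
      simp [h1, h2, Option.map_map, Function.comp_def]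

lemma loopP_join (chunks : List (List Char)) (hfree : ∀ ch ∈ chunks, ',' ∉ ch) (lvl : Int) :
    loopP (PySem.Chars.join [','] chunks) lvl
      = (scanC chunks lvl).map (PySem.Chars.join [',']) := by
  induction chunks generalizing lvl with
  | nil => simp [PySem.Chars.join_nil, loopP, scanC]
  | cons ch rest ih =>
    have hch : ',' ∉ ch := hfree ch List.mem_cons_self
    cases rest with
    | nil =>
      rw [PySem.Chars.join_singleton]
      have := loopP_skip ch hch [] lvl
      simp only [List.append_nil] at this
      rw [this]
      simp [loopP, scanC]
    | cons r rs =>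
      rw [PySem.Chars.join_cons_cons]
      have hskip := loopP_skip ch hch (',' :: PySem.Chars.join [','] (r :: rs)) lvl
      rw [show ch ++ [','] ++ PySem.Chars.join [','] (r :: rs)
            = ch ++ (',' :: PySem.Chars.join [','] (r :: rs)) by simp]
      rw [hskip]
      simp only [loopP, if_neg (by decide : ¬ (',' : Char) = '('),
        if_neg (by decide : ¬ (',' : Char) = ')')]
      by_cases hz : lvl + balL ch = 0
      · simp [hz, scanC, PySem.Chars.join_singleton]
      · rw [if_neg (by simp [hz])]
        rw [ih (fun c hc => hfree c (List.mem_cons_of_mem _ hc))]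
        have hout : scanC (ch :: r :: rs) lvl
            = (scanC (r :: rs) (lvl + balL ch)).map (ch :: ·) := by
          simp [scanC, hz]
        rw [hout]
        cases hsc : scanC (r :: rs) (lvl + balL ch) with
        | none => simp
        | some t =>
          obtain ⟨q, qs, rfl⟩ := List.exists_cons_of_ne_nil (scanC_ne_nil hsc)
          simp [Option.map_map, Function.comp_def, PySem.Chars.join_cons_cons]

lemma loopB_scan (s : String) : ∀ (chunks : List (List Char)) (lvl : Int) (acc : List (List Char)),
    loopB s chunks lvl acc
      = match scanC chunks lvl with
        | some t => String.ofList (PySem.Chars.join [','] (acc ++ t))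
        | none => s := by
  intro chunks
  induction chunks with
  | nil => intro lvl acc; simp [loopB, scanC]
  | cons ch rest ih =>
    intro lvl acc
    simp only [loopB, chunkBal_eq, scanC]
    by_cases hrest : rest = []
    · subst hrest
      simp [loopB]
    · by_cases hz : lvl + balL ch = 0
      · rw [if_pos ⟨hz, hrest⟩, if_neg hrest, if_pos hz]
      · rw [if_neg (by simp [hz]), if_neg hrest, if_neg hz, ih]
        cases hsc : scanC rest (lvl + balL ch) with
        | none => simp
        | some t => simp

lemma join_splitC (l : List Char) : PySem.Chars.join [','] (splitC l) = l := by
  induction l with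
  | nil => simp [splitC, PySem.Chars.join_singleton]
  | cons c rest ih =>
    by_cases hc : c = ','
    · subst hc
      obtain ⟨p, ps, hps⟩ := List.exists_cons_of_ne_nil (splitC_ne_nil rest)
      rw [show splitC (',' :: rest) = [] :: splitC rest by simp [splitC], hps]
      rw [PySem.Chars.join_cons_cons]
      rw [hps] at ih
      simpa using ih
    · obtain ⟨p, ps, hps⟩ := List.exists_cons_of_ne_nil (splitC_ne_nil rest)
      simp only [splitC, if_neg hc, hps]
      rw [hps] at ih
      cases ps with
      | nil => rw [PySem.Chars.join_singleton] at ih ⊢; simp [ih]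
      | cons q qs =>
        rw [PySem.Chars.join_cons_cons] at ih ⊢
        simp [← ih]

lemma splitC_comma_free (l : List Char) : ∀ ch ∈ splitC l, ',' ∉ ch := by
  induction l with
  | nil => simp [splitC]
  | cons c rest ih =>
    by_cases hc : c = ','
    · subst hc
      simp only [splitC, if_pos rfl]
      intro ch hch
      rcases List.mem_cons.mp hch with rfl | h
      · simp
      · exact ih ch h
    · obtain ⟨p, ps, hps⟩ := List.exists_cons_of_ne_nil (splitC_ne_nil rest)
      simp only [splitC, if_neg hc, hps]
      intro ch hch
      rcases List.mem_cons.mp hch with rfl | h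
      · intro hmem
        rcases List.mem_cons.mp hmem with rfl | h2
        · exact hc rfl
        · exact ih p (hps ▸ List.mem_cons_self) h2
      · exact ih ch (hps ▸ List.mem_cons_of_mem _ h)

-- ===== VERDICT (by name: the statement is the Claim_ definition above) =====
theorem remove_text_after_comma_spec : Claim_equal_remove_text_after_comma := by
  intro s _hdom
  unfold Spec_remove_text_after_comma remove_text_after_comma remove_text_after_comma_alt
  rw [splitOn_comma, loopB_scan]
  rw [idx_bridge]
  have h1 : loopP s.toList 0 = (scanC (splitC s.toList) 0).map (PySem.Chars.join [',']) := by
    conv_lhs => rw [← join_splitC s.toList]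
    exact loopP_join _ (splitC_comma_free _) 0
  rw [h1]
  cases hsc : scanC (splitC s.toList) 0 with
  | none => simp
  | some t =>
    simp only [Option.map_some, List.nil_append]
    have hp : loopP s.toList 0 = some (PySem.Chars.join [','] t) := by rw [h1, hsc]; rfl
    obtain ⟨r, hr⟩ := loopP_prefix _ _ _ hp
    rw [PySem.List.slice_to_natCast]
    congr 1
    simp only [Nat.zero_add]
    conv_lhs => rw [hr]
    exact List.take_left
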